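-- pv_equiv track=rewrite | github.com/teodor1006/Bachelor-thesis | DQC_Partition/RandomPartitions.py | find_global_gates
-- ===== SOURCE A (Python) =====
-- def find_global_gates(gate_list,part_qbits):
--     global_gates = []
--     for gate in gate_list:
--         gate_qbits = set(gate)
--         is_global = True
--         for qubits in part_qbits:
--             if gate_qbits.issubset(qubits):
--                 is_global = False
--                 break
--         if is_global:
--             global_gates.append(gate)
--     return global_gates
-- ===== SOURCE B (Python) =====
-- def find_global_gates(gate_list, part_qbits):
--     qmask = {}
--     for i, qubits in enumerate(part_qbits):
--         bit = 1 << i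
--         for q in qubits:
--             qmask[q] = qmask.get(q, 0) | bit
--     full = (1 << len(part_qbits)) - 1
--     global_gates = []
--     for gate in gate_list:
--         m = full
--         for q in gate:
--             m &= qmask.get(q, 0)
--         if m == 0:
--             global_gates.append(gate)
--     return global_gates
-- ===== Notes on version B (the rewrite author's own statement) =====
-- stated objective: alternative
-- what changed: B builds a qubit->partition-bitmask dict once and marks a gate global iff the bitwise AND of its qubits' masks is zero, replacing A's per-gate subset test against every partition.
import Mathlib
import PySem

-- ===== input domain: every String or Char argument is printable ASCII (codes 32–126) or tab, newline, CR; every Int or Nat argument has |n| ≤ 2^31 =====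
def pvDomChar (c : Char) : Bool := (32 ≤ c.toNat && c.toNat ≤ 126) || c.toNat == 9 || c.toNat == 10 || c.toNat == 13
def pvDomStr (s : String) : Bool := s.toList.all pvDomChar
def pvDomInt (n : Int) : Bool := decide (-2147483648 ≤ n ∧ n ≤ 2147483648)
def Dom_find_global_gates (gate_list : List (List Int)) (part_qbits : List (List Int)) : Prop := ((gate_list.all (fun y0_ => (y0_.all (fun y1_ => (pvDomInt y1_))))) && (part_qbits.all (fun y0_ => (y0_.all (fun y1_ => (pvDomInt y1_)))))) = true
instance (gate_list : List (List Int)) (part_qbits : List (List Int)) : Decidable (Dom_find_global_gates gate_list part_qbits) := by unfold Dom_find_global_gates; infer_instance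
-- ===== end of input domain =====

-- B builds a qubit→partition-bitmask dict once and marks a gate global iff the bitwise AND of
-- its qubits' masks is zero — a different algorithm from A's per-gate subset test per partition.

-- ===== PORT A =====
-- set(gate).issubset(qubits)
def pvSubsetA (s qs : List Int) : Bool := s.all (fun x => qs.contains x)

-- the inner 'for qubits in part_qbits: … break' loop, returning is_global
def pvIsGlobalA (gq : List Int) : List (List Int) → Bool
  | [] => true
  | qs :: rest => if pvSubsetA gq qs then false else pvIsGlobalA gq rest

def find_global_gates (gate_list : List (List Int)) (part_qbits : List (List Int)) : List (List Int) :=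
  gate_list.foldl
    (fun acc gate => if pvIsGlobalA (PySem.Set.ofList gate) part_qbits then acc ++ [gate] else acc) []

-- ===== PORT B =====
-- inner 'for q in qubits: qmask[q] = qmask.get(q, 0) | bit'
def pvAddPart (d : PySem.Dict Int Nat) (bit : Nat) (qs : List Int) : PySem.Dict Int Nat :=
  qs.foldl (fun d q => d.insert q (d.getD q 0 ||| bit)) d

-- 'for i, qubits in enumerate(part_qbits): …' — enumerate's index is a nonnegative int,
-- carried here as the Nat counter i; masks are the nonnegative ints of Source B, carried as Nat.
def pvQMask : List (List Int) → Nat → PySem.Dict Int Nat → PySem.Dict Int Nat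
  | [], _, d => d
  | qs :: rest, i, d => pvQMask rest (i + 1) (pvAddPart d (1 <<< i) qs)

def find_global_gates_alt (gate_list : List (List Int)) (part_qbits : List (List Int)) : List (List Int) :=
  let qmask := pvQMask part_qbits 0 PySem.Dict.empty
  let full := (1 <<< part_qbits.length) - 1
  gate_list.foldl
    (fun acc gate =>
      let m := gate.foldl (fun m q => m &&& qmask.getD q 0) full
      if m == 0 then acc ++ [gate] else acc) []

-- ===== PRECONDITION & SPEC =====
def Spec_find_global_gates (gate_list : List (List Int)) (part_qbits : List (List Int)) (out : List (List Int)) : Prop := out = find_global_gates_alt gate_list part_qbits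
instance (gate_list : List (List Int)) (part_qbits : List (List Int)) (out : List (List Int)) : Decidable (Spec_find_global_gates gate_list part_qbits out) := by unfold Spec_find_global_gates; infer_instance

-- ===== CLAIM (what is proved, stated in full; the proofs are below) =====
def Claim_equal_find_global_gates : Prop := ∀ (gate_list : List (List Int)) (part_qbits : List (List Int)), Dom_find_global_gates gate_list part_qbits → Spec_find_global_gates gate_list part_qbits (find_global_gates gate_list part_qbits)

-- ===== LEMMAS AND PROOFS =====

-- subset over set(gate) is subset over gate
theorem pvSubsetA_ofList (g qs : List Int) : pvSubsetA (PySem.Set.ofList g) qs = pvSubsetA g qs := by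
  apply Bool.eq_iff_iff.mpr
  simp [pvSubsetA, List.all_eq_true, PySem.Set.mem_ofList]

theorem pvIsGlobalA_iff (gq : List Int) (pq : List (List Int)) :
    pvIsGlobalA gq pq = true ↔ ∀ qs ∈ pq, ¬ pvSubsetA gq qs = true := by
  induction pq with
  | nil => simp [pvIsGlobalA]
  | cons qs rest ih =>
    by_cases h : pvSubsetA gq qs = true <;> simp [pvIsGlobalA, h, ih]

theorem testBit_addPart (qs : List Int) (d : PySem.Dict Int Nat) (bit : Nat) (q : Int) (j : Nat) :
    Nat.testBit ((pvAddPart d bit qs).getD q 0) j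
      = (Nat.testBit (d.getD q 0) j || (decide (q ∈ qs) && Nat.testBit bit j)) := by
  induction qs generalizing d with
  | nil => simp [pvAddPart]
  | cons p qs ih =>
    show Nat.testBit ((pvAddPart (d.insert p (d.getD p 0 ||| bit)) bit qs).getD q 0) j = _
    rw [ih]
    rw [PySem.Dict.getD_insert]
    by_cases hpq : q = p
    · subst hpq
      simp only [if_true, List.mem_cons, true_or, decide_true, Bool.true_and, Nat.testBit_or]
      cases Nat.testBit (d.getD q 0) j <;> cases Nat.testBit bit j <;>
        cases decide (q ∈ qs) <;> rfl
    · simp [hpq, List.mem_cons]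

theorem testBit_qmask (pq : List (List Int)) (i : Nat) (d : PySem.Dict Int Nat) (q : Int) (j : Nat) :
    Nat.testBit ((pvQMask pq i d).getD q 0) j
      = (Nat.testBit (d.getD q 0) j
          || (decide (i ≤ j) && decide (j - i < pq.length) && decide (q ∈ pq.getD (j - i) []))) := by
  induction pq generalizing i d with
  | nil => simp [pvQMask]
  | cons qs rest ih =>
    show Nat.testBit ((pvQMask rest (i + 1) (pvAddPart d (1 <<< i) qs)).getD q 0) j = _
    rw [ih, testBit_addPart]
    have h1 : Nat.testBit (1 <<< i) j = decide (j = i) := by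
      rw [Nat.one_shiftLeft, Nat.testBit_two_pow]
      simp only [decide_eq_decide]
      omega
    rw [h1]
    by_cases hji : j = i
    · subst hji
      simp
    · by_cases hij : i ≤ j
      · have e1 : j - i = (j - (i + 1)) + 1 := by omega
        rw [e1, List.getD_cons_succ]
        have b1 : decide (j = i) = false := by simp [hji]
        have b2 : decide (i + 1 ≤ j) = decide (i ≤ j) := by
          simp only [decide_eq_decide]; omega
        have b3 : decide (j - (i + 1) < rest.length)
            = decide (j - (i + 1) + 1 < (qs :: rest).length) := by
          simp only [decide_eq_decide, List.length_cons]; omega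
        rw [b1, b2, b3]
        simp
      · have h3 : ¬ (i + 1 ≤ j) := by omega
        simp [hij, h3, hji]

theorem testBit_gatefold (g : List Int) (f : Int → Nat) (init : Nat) (j : Nat) :
    Nat.testBit (g.foldl (fun m q => m &&& f q) init) j
      = (Nat.testBit init j && g.all (fun q => Nat.testBit (f q) j)) := by
  induction g generalizing init with
  | nil => simp
  | cons q g ih =>
    simp only [List.foldl_cons, List.all_cons]
    rw [ih, Nat.testBit_and, Bool.and_assoc]

theorem nat_eq_zero_iff_testBit (n : Nat) : n = 0 ↔ ∀ j, Nat.testBit n j = false := by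
  constructor
  · rintro rfl j; simp
  · intro h
    apply Nat.eq_of_testBit_eq
    intro j; simp [h j]

-- the two append conditions agree on every gate
theorem cond_eq (pq : List (List Int)) (g : List Int) :
    pvIsGlobalA (PySem.Set.ofList g) pq
      = ((g.foldl (fun m q => m &&& (pvQMask pq 0 PySem.Dict.empty).getD q 0)
            ((1 <<< pq.length) - 1)) == 0) := by
  apply Bool.eq_iff_iff.mpr
  rw [pvIsGlobalA_iff, beq_iff_eq, nat_eq_zero_iff_testBit]
  have hfull : ∀ j, Nat.testBit ((1 <<< pq.length) - 1) j = decide (j < pq.length) := by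
    intro j; rw [Nat.one_shiftLeft, Nat.testBit_two_pow_sub_one]
  have hq : ∀ (q : Int) (j : Nat),
      Nat.testBit ((pvQMask pq 0 PySem.Dict.empty).getD q 0) j
        = (decide (j < pq.length) && decide (q ∈ pq.getD j [])) := by
    intro q j
    rw [testBit_qmask]
    simp [PySem.Dict.empty, PySem.Dict.getD, PySem.Dict.get?]
  constructor
  · intro h j
    rw [testBit_gatefold, hfull]
    by_cases hj : j < pq.length
    · simp only [hj, decide_true, Bool.true_and]
      have hmem : pq.getD j [] ∈ pq := by
        rw [List.getD_eq_getElem pq [] hj]; exact List.getElem_mem hj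
      have := h _ hmem
      simp only [pvSubsetA_ofList] at this
      simp only [pvSubsetA, List.all_eq_true] at this
      push Not at this
      obtain ⟨x, hx, hnx⟩ := this
      apply List.all_eq_false.mpr
      refine ⟨x, hx, ?_⟩
      rw [hq]
      simp at hnx ⊢
      intro _; exact hnx
    · simp [hj]
  · intro h qs hqs
    rw [pvSubsetA_ofList]
    obtain ⟨j, hj, rfl⟩ := List.mem_iff_getElem.mp hqs
    have := h j
    rw [testBit_gatefold, hfull] at this
    simp only [hj, decide_true, Bool.true_and] at this
    rcases List.all_eq_false.mp this with ⟨x, hx, hnx⟩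
    rw [hq] at hnx
    simp only [hj, decide_true, Bool.true_and, List.getD_eq_getElem pq [] hj] at hnx
    intro hsub
    simp only [pvSubsetA, List.all_eq_true] at hsub
    have := hsub x hx
    simp at hnx this
    exact hnx this

-- ===== VERDICT (by name: the statement is the Claim_ definition above) =====
theorem find_global_gates_spec : Claim_equal_find_global_gates := by
  intro gl pq _
  show find_global_gates gl pq = find_global_gates_alt gl pq
  unfold find_global_gates find_global_gates_alt
  simp only []
  have h := cond_eq pq
  simp only [h]
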